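-- pv_equiv track=rewrite | github.com/entishl/nkrbehgamehelper | src/decomposition.py | decompose_shape_to_rectangles
-- ===== SOURCE A (Python) =====
-- def decompose_shape_to_rectangles(points):
--     """
--     将一个由点集定义的形状分解为不重叠的矩形列表。
--     使用基于扫描线和合并的贪心算法。
--     返回 [(dx, dy, width, height), ...]
--     """
--     if not points:
--         return []
--
--     point_set = {tuple(p) for p in points}
--     rectangles = []
--
--     while point_set:
--         # 找到 y 最小、然后 x 最小的点作为起始点
--         start_point = min(point_set, key=lambda p: (p[1], p[0]))
--         x, y = start_point
--
--         # 1. 向右延伸找到最大宽度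
--         width = 1
--         while (x + width, y) in point_set:
--             width += 1
--
--         # 2. 将此线段向下延伸找到最大高度
--         height = 1
--         while True:
--             # 检查下一行是否所有点都存在
--             next_row_solid = True
--             for i in range(width):
--                 if (x + i, y + height) not in point_set:
--                     next_row_solid = False
--                     break
--             if next_row_solid:
--                 height += 1
--             else:
--                 break
--
--         # 将生成的矩形添加到列表
--         rectangles.append((x, y, width, height))
--
--         # 从点集中移除构成该矩形的所有点
--         points_to_remove = set()
--         for i in range(width):
--             for j in range(height):
--                 points_to_remove.add((x + i, y + j))
--
--         point_set -= points_to_remove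
--
--     return rectangles
-- ===== SOURCE B (Python) =====
-- def decompose_shape_to_rectangles(points):
--     """
--     Same decomposition, but the remaining point set is never re-scanned for its
--     minimum: the distinct points are sorted once by (y, x) and visited in that
--     order, skipping points already consumed by an earlier rectangle.
--     """
--     alive = set(map(tuple, points))
--     order = sorted(alive, key=lambda p: (p[1], p[0]))
--     rectangles = []
--     for (x, y) in order:
--         if (x, y) not in alive:
--             continue
--         width = 1
--         while (x + width, y) in alive:
--             width += 1
--         height = 1
--         while all((x + i, y + height) in alive for i in range(width)):
--             height += 1
--         rectangles.append((x, y, width, height))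
--         alive.difference_update((x + i, y + j)
--                                 for i in range(width) for j in range(height))
--     return rectangles
-- ===== Notes on version B (the rewrite author's own statement) =====
-- stated objective: faster
-- what changed: Instead of re-scanning the whole remaining set for its (y,x)-minimum on every iteration, B sorts the distinct points once by (y,x) and walks that list, skipping points already consumed by a previous rectangle.
import Mathlib
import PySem

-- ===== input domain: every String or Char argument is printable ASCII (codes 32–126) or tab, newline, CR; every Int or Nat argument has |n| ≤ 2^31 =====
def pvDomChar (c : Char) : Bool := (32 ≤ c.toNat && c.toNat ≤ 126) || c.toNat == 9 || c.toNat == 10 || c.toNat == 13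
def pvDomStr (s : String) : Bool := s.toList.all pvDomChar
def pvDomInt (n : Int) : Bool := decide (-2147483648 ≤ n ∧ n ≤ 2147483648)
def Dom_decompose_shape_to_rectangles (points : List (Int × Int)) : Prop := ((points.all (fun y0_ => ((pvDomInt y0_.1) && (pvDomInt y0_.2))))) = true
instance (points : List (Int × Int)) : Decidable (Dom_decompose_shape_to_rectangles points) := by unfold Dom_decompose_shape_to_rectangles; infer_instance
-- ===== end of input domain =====

-- B replaces A's per-iteration rescan of the remaining set for its (y,x)-minimum by one sort
-- of the distinct points followed by a single walk that skips consumed points (objective: faster).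

-- ===== PORT A =====
-- 'width = 1; while (x+width, y) in point_set: width += 1'.  The fuel S.length is never
-- exhausted: each successful test consumes a distinct member of S, so at most S.length
-- iterations can succeed, and running out of fuel returns the same w as a failing test.
def pvGrowW (S : PySem.Set (Int × Int)) (x y : Int) (w : Int) : Nat → Int
  | 0 => w
  | fuel + 1 => if PySem.Set.contains S (x + w, y) then pvGrowW S x y (w + 1) fuel else w

-- the 'for i in range(width): if … not in point_set: next_row_solid = False; break' scan
def pvRowSolidA (S : PySem.Set (Int × Int)) (x yh : Int) : List Int → Bool
  | [] => true
  | i :: rest =>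
      if !(PySem.Set.contains S (x + i, yh)) then false else pvRowSolidA S x yh rest

-- 'height = 1; while <next row solid>: height += 1' (same fuel argument as pvGrowW:
-- each successful test consumes at least one fresh member of S)
def pvGrowHA (S : PySem.Set (Int × Int)) (x y w : Int) (h : Int) : Nat → Int
  | 0 => h
  | fuel + 1 =>
      if pvRowSolidA S x (y + h) (PySem.List.pyRange 0 w 1) then pvGrowHA S x y w (h + 1) fuel else h

-- 'points_to_remove = set(); for i in range(width): for j in range(height): add(…)'
def pvRmA (x y w h : Int) : PySem.Set (Int × Int) :=
  (PySem.List.pyRange 0 w 1).foldl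
    (fun s i => (PySem.List.pyRange 0 h 1).foldl (fun s j => PySem.Set.add s (x + i, y + j)) s)
    PySem.Set.empty

-- lemmas cited by pvLoopA's decreasing_by (the port needs them for termination)
lemma pvGrowW_ge (S : PySem.Set (Int × Int)) (x y : Int) :
    ∀ (fuel : Nat) (w : Int), w ≤ pvGrowW S x y w fuel := by
  intro fuel
  induction fuel with
  | zero => intro w; simp [pvGrowW]
  | succ n ih =>
    intro w
    simp only [pvGrowW]
    split
    · exact le_trans (by omega) (ih (w + 1))
    · exact le_refl w

lemma pvGrowHA_ge (S : PySem.Set (Int × Int)) (x y w : Int) :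
    ∀ (fuel : Nat) (h : Int), h ≤ pvGrowHA S x y w h fuel := by
  intro fuel
  induction fuel with
  | zero => intro h; simp [pvGrowHA]
  | succ n ih =>
    intro h
    simp only [pvGrowHA]
    split
    · exact le_trans (by omega) (ih (h + 1))
    · exact le_refl h

-- pvPts is B's flat enumeration of the rectangle; A's nested set-building loop yields the same Set
def pvPts (x y w h : Int) : List (Int × Int) :=
  (PySem.List.pyRange 0 w 1).flatMap (fun i => (PySem.List.pyRange 0 h 1).map (fun j => (x + i, y + j)))

lemma pvRmA_eq (x y w h : Int) : pvRmA x y w h = PySem.Set.ofList (pvPts x y w h) := by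
  rw [pvRmA, pvPts, PySem.Set.ofList_eq_foldl, List.foldl_flatMap]
  simp [List.foldl_map, PySem.Set.empty]

lemma pvMem_rmA (x y w h : Int) (hw : 1 ≤ w) (hh : 1 ≤ h) : (x, y) ∈ pvRmA x y w h := by
  rw [pvRmA_eq, PySem.Set.mem_ofList, pvPts]
  rw [List.mem_flatMap]
  refine ⟨0, ?_, ?_⟩
  · rw [PySem.List.mem_pyRange_one]; omega
  · rw [List.mem_map]
    exact ⟨0, by rw [PySem.List.mem_pyRange_one]; omega, by simp⟩

-- the foldl step of min2? with key (p.2, p.1) (proof helper; pvLoopA's decreasing_by cites pvMin2_mem)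
def pvStep (acc : Option (Int × Int)) (x : Int × Int) : Option (Int × Int) :=
  match acc with
  | none => some x
  | some m =>
      if (decide (x.2 < m.2) || !decide (m.2 < x.2) && decide (x.1 < m.1)) = true then some x
      else some m

lemma pvMin2_unfold (xs : List (Int × Int)) :
    PySem.List.min2? xs (fun p => p.2) (fun p => p.1) = xs.foldl pvStep none := by
  simp only [PySem.List.min2?]
  apply PySem.List.foldl_congr_mem
  intro acc x _
  cases acc <;> rfl

lemma pvStepFold_mem :
    ∀ (xs : List (Int × Int)) (acc : Option (Int × Int)) (r : Int × Int),
      xs.foldl pvStep acc = some r → acc = some r ∨ r ∈ xs := by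
  intro xs
  induction xs with
  | nil => intro acc r h; exact Or.inl h
  | cons x rest ih =>
    intro acc r h
    rcases ih _ r h with h' | h'
    · match acc, h' with
      | none, h' =>
        right
        simp only [pvStep] at h'
        simp [← Option.some.inj h']
      | some m, h' =>
        simp only [pvStep] at h'
        split at h'
        · right; simp [← Option.some.inj h']
        · exact Or.inl h'
    · exact Or.inr (List.mem_cons_of_mem x h')

lemma pvMin2_mem (xs : List (Int × Int)) (m : Int × Int)
    (h : PySem.List.min2? xs (fun p => p.2) (fun p => p.1) = some m) : m ∈ xs := by
  rw [pvMin2_unfold] at h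
  rcases pvStepFold_mem xs none m h with h' | h'
  · exact absurd h' (by simp)
  · exact h'

lemma pvDiff_lt (S rm : PySem.Set (Int × Int)) (a : Int × Int) (ha : a ∈ S) (hrm : a ∈ rm) :
    (PySem.Set.diff S rm).length < S.length := by
  rw [PySem.Set.diff]
  rw [List.length_filter_lt_length_iff_exists]
  exact ⟨a, ha, by simp [PySem.Set.contains, hrm]⟩

-- 'while point_set:' — the loop body; the (y,x)-minimum is min2? (key injective on a set,
-- so Python's set-iteration order cannot influence the result)
def pvLoopA (S : PySem.Set (Int × Int)) : List (Int × Int × Int × Int) :=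
  match hm : PySem.List.min2? S (fun p => p.2) (fun p => p.1) with
  | none => []
  | some st =>
      let w := pvGrowW S st.1 st.2 1 S.length
      let h := pvGrowHA S st.1 st.2 w 1 S.length
      (st.1, st.2, w, h) :: pvLoopA (PySem.Set.diff S (pvRmA st.1 st.2 w h))
termination_by S.length
decreasing_by
  have hst : st ∈ S := pvMin2_mem S st hm
  have hw : (1 : Int) ≤ pvGrowW S st.1 st.2 1 S.length := pvGrowW_ge S st.1 st.2 S.length 1
  have hh : (1 : Int) ≤ pvGrowHA S st.1 st.2 (pvGrowW S st.1 st.2 1 S.length) 1 S.length :=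
    pvGrowHA_ge S st.1 st.2 _ S.length 1
  exact pvDiff_lt S _ st hst (by simpa using pvMem_rmA st.1 st.2 _ _ hw hh)

def decompose_shape_to_rectangles (points : List (Int × Int)) : List (Int × Int × Int × Int) :=
  if points = [] then []
  else pvLoopA (PySem.Set.ofList points)

-- ===== PORT B =====
-- same 'width = 1; while (x+width, y) in alive: width += 1' loop (fuel as in pvGrowW)
def pvGrowWB (S : PySem.Set (Int × Int)) (x y : Int) (w : Int) : Nat → Int
  | 0 => w
  | fuel + 1 => if PySem.Set.contains S (x + w, y) then pvGrowWB S x y (w + 1) fuel else w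

-- 'height = 1; while all((x+i, y+height) in alive for i in range(width)): height += 1'
def pvGrowHB (S : PySem.Set (Int × Int)) (x y w : Int) (h : Int) : Nat → Int
  | 0 => h
  | fuel + 1 =>
      if (PySem.List.pyRange 0 w 1).all (fun i => PySem.Set.contains S (x + i, y + h)) then
        pvGrowHB S x y w (h + 1) fuel
      else h

-- (pvPts, defined above with the A-side helpers, is the generator
-- '((x+i, y+j) for i in range(width) for j in range(height))')
-- 'for (x, y) in order: if (x, y) not in alive: continue; …'
def pvLoopB : List (Int × Int) → PySem.Set (Int × Int) → List (Int × Int × Int × Int)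
  | [], _ => []
  | p :: rest, alive =>
      if PySem.Set.contains alive p then
        let w := pvGrowWB alive p.1 p.2 1 alive.length
        let h := pvGrowHB alive p.1 p.2 w 1 alive.length
        (p.1, p.2, w, h) :: pvLoopB rest ((pvPts p.1 p.2 w h).foldl PySem.Set.discard alive)
      else pvLoopB rest alive

def decompose_shape_to_rectangles_alt (points : List (Int × Int)) : List (Int × Int × Int × Int) :=
  let alive := PySem.Set.ofList points
  pvLoopB (PySem.List.sorted2 alive (fun p => p.2) (fun p => p.1)) alive

-- ===== PRECONDITION & SPEC =====
def Spec_decompose_shape_to_rectangles (points : List (Int × Int)) (out : List (Int × Int × Int × Int)) : Prop := out = decompose_shape_to_rectangles_alt points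
instance (points : List (Int × Int)) (out : List (Int × Int × Int × Int)) : Decidable (Spec_decompose_shape_to_rectangles points out) := by unfold Spec_decompose_shape_to_rectangles; infer_instance

-- ===== CLAIM (what is proved, stated in full; the proofs are below) =====
def Claim_equal_decompose_shape_to_rectangles : Prop := ∀ (points : List (Int × Int)), Dom_decompose_shape_to_rectangles points → Spec_decompose_shape_to_rectangles points (decompose_shape_to_rectangles points)

-- ===== LEMMAS AND PROOFS =====

-- Python's tuple order (p[1], p[0]): strict and non-strict versions
def pvLexLT (p q : Int × Int) : Prop := p.2 < q.2 ∨ (p.2 = q.2 ∧ p.1 < q.1)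
def pvLexLE (p q : Int × Int) : Prop := p.2 < q.2 ∨ (p.2 = q.2 ∧ p.1 ≤ q.1)

lemma pvLexLT_of_le_ne {p q : Int × Int} (hle : pvLexLE p q) (hne : p ≠ q) : pvLexLT p q := by
  obtain ⟨p1, p2⟩ := p
  obtain ⟨q1, q2⟩ := q
  simp only [pvLexLE, pvLexLT] at *
  simp only [ne_eq, Prod.mk.injEq, not_and] at hne
  rcases hle with h | ⟨h2, h1⟩
  · exact Or.inl h
  · rcases eq_or_lt_of_le h1 with h | h
    · exact absurd h2 (hne h)
    · exact Or.inr ⟨h2, h⟩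

lemma pvGrowW_eq (S : PySem.Set (Int × Int)) (x y : Int) :
    ∀ (fuel : Nat) (w : Int), pvGrowWB S x y w fuel = pvGrowW S x y w fuel := by
  intro fuel
  induction fuel with
  | zero => intro w; rfl
  | succ n ih =>
    intro w
    simp only [pvGrowWB, pvGrowW]
    split
    · exact ih (w + 1)
    · rfl

lemma pvRowSolid_eq (S : PySem.Set (Int × Int)) (x yh : Int) (is : List Int) :
    pvRowSolidA S x yh is = is.all (fun i => PySem.Set.contains S (x + i, yh)) := by
  induction is with
  | nil => rfl
  | cons i rest ih =>
    simp only [pvRowSolidA, List.all_cons, ih]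
    cases PySem.Set.contains S (x + i, yh) <;> simp

lemma pvGrowH_eq (S : PySem.Set (Int × Int)) (x y w : Int) :
    ∀ (fuel : Nat) (h : Int), pvGrowHB S x y w h fuel = pvGrowHA S x y w h fuel := by
  intro fuel
  induction fuel with
  | zero => intro h; rfl
  | succ n ih =>
    intro h
    simp only [pvGrowHB, pvGrowHA, pvRowSolid_eq]
    split
    · exact ih (h + 1)
    · rfl

lemma pvFoldlDiscard (pts : List (Int × Int)) :
    ∀ S : PySem.Set (Int × Int),
      pts.foldl PySem.Set.discard S = S.filter (fun a => !pts.contains a) := by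
  induction pts with
  | nil => intro S; simp
  | cons x rest ih =>
    intro S
    simp only [List.foldl_cons]
    rw [ih, PySem.Set.discard, List.filter_filter]
    apply List.filter_congr
    intro a _
    simp only [List.contains_cons, Bool.not_or]
    cases a == x <;> simp

lemma pvDiscard_eq_diff (S : PySem.Set (Int × Int)) (pts : List (Int × Int)) :
    pts.foldl PySem.Set.discard S = PySem.Set.diff S (PySem.Set.ofList pts) := by
  rw [pvFoldlDiscard, PySem.Set.diff]
  apply List.filter_congr
  intro a _
  by_cases h : a ∈ pts
  · simp [PySem.Set.contains, h, (PySem.Set.mem_ofList pts a).mpr h]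
  · simp [PySem.Set.contains, h]

-- min2? returns the strict minimum when one exists
lemma pvStepFold_min :
    ∀ (xs : List (Int × Int)) (acc : Option (Int × Int)) (p : Int × Int),
      (∀ q ∈ xs, q = p ∨ pvLexLT p q) →
      (∀ a, acc = some a → a = p ∨ pvLexLT p a) →
      (p ∈ xs ∨ acc = some p) →
      xs.foldl pvStep acc = some p := by
  intro xs
  induction xs with
  | nil =>
    intro acc p _ _ hin
    rcases hin with h | h
    · exact absurd h (List.not_mem_nil)
    · simpa using h
  | cons x rest ih =>
    intro acc p hall hacc hin
    simp only [List.foldl_cons]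
    have hcond : ∀ m : Int × Int,
        ((decide (x.2 < m.2) || !decide (m.2 < x.2) && decide (x.1 < m.1)) = true) ↔ pvLexLT x m := by
      intro m; simp [pvLexLT]; omega
    apply ih _ p (fun q hq => hall q (List.mem_cons_of_mem x hq))
    · intro a ha
      match acc, ha with
      | none, ha =>
        simp only [pvStep] at ha
        have : x = a := Option.some.inj ha
        subst this
        exact hall x List.mem_cons_self
      | some m, ha =>
        simp only [pvStep] at ha
        split at ha
        · have : x = a := Option.some.inj ha
          subst this
          exact hall x List.mem_cons_self
        · exact hacc a (by rw [← ha])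
    · by_cases hx : x = p
      · subst hx
        right
        match acc with
        | none => rfl
        | some m =>
          rcases hacc m rfl with hm | hm
          · subst hm
            simp only [pvStep]
            rw [if_neg]
            simp only [hcond m]
            simp [pvLexLT]
          · simp only [pvStep]
            rw [if_pos ((hcond m).mpr hm)]
      · have hpx : pvLexLT p x := by
          rcases hall x List.mem_cons_self with h | h
          · exact absurd h hx
          · exact h
        rcases hin with h | h
        · left
          rcases List.mem_cons.mp h with h' | h'
          · exact absurd h'.symm hx
          · exact h'
        · right
          rw [h]
          simp only [pvStep]
          rw [if_neg]
          simp only [hcond p]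
          simp only [pvLexLT] at hpx ⊢
          omega

lemma pvMin2_eq (alive : List (Int × Int)) (p : Int × Int) (hp : p ∈ alive)
    (hall : ∀ q ∈ alive, q = p ∨ pvLexLT p q) :
    PySem.List.min2? alive (fun p => p.2) (fun p => p.1) = some p := by
  rw [pvMin2_unfold]
  exact pvStepFold_min alive none p hall (by simp) (Or.inl hp)

-- insertion keeps a lex-sorted accumulator lex-sorted
lemma pvInsertBy_pw (before : (Int × Int) → (Int × Int) → Bool)
    (h1 : ∀ a b, before a b = true → pvLexLE a b)
    (h2 : ∀ a b, before a b = false → pvLexLE b a)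
    (x : Int × Int) :
    ∀ ys : List (Int × Int), ys.Pairwise pvLexLE →
      (PySem.List.insertBy before x ys).Pairwise pvLexLE := by
  have htrans : ∀ {a b c : Int × Int}, pvLexLE a b → pvLexLE b c → pvLexLE a c := by
    intro a b c hab hbc
    simp only [pvLexLE] at *
    omega
  intro ys
  induction ys with
  | nil => intro _; simp [PySem.List.insertBy]
  | cons y ys ih =>
    intro hp
    rw [List.pairwise_cons] at hp
    simp only [PySem.List.insertBy]
    split
    · rename_i hby
      rw [List.pairwise_cons]
      refine ⟨?_, List.pairwise_cons.mpr hp⟩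
      intro z hz
      rcases List.mem_cons.mp hz with hz | hz
      · subst hz; exact h1 _ _ hby
      · exact htrans (h1 _ _ hby) (hp.1 z hz)
    · rename_i hby
      rw [List.pairwise_cons]
      refine ⟨?_, ih hp.2⟩
      intro z hz
      rcases (PySem.List.mem_insertBy _ _ _ _).mp hz with hz | hz
      · subst hz; exact h2 _ _ (by simpa using hby)
      · exact hp.1 z hz

lemma pvFoldlInsert_pw (before : (Int × Int) → (Int × Int) → Bool)
    (h1 : ∀ a b, before a b = true → pvLexLE a b)
    (h2 : ∀ a b, before a b = false → pvLexLE b a) :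
    ∀ (xs acc : List (Int × Int)), acc.Pairwise pvLexLE →
      (xs.foldl (fun acc x => PySem.List.insertBy before x acc) acc).Pairwise pvLexLE := by
  intro xs
  induction xs with
  | nil => intro acc h; exact h
  | cons x rest ih =>
    intro acc h
    exact ih _ (pvInsertBy_pw before h1 h2 x acc h)

lemma pvSorted2_pairwise (S : PySem.Set (Int × Int)) :
    (PySem.List.sorted2 S (fun p => p.2) (fun p => p.1)).Pairwise pvLexLE := by
  simp only [PySem.List.sorted2]
  apply pvFoldlInsert_pw
  · intro a b h; simp only [pvLexLE]; simp at h; omega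
  · intro a b h; simp only [pvLexLE]; simp at h; omega
  · exact List.Pairwise.nil

-- the master loop correspondence: walking a lex-sorted superlist of the remaining set,
-- skipping consumed points, equals repeatedly extracting the lex-minimum
lemma pvLoop_eq :
    ∀ (ord : List (Int × Int)) (alive : PySem.Set (Int × Int)),
      (∀ q ∈ alive, q ∈ ord) → ord.Pairwise pvLexLT →
      pvLoopB ord alive = pvLoopA alive := by
  intro ord
  induction ord with
  | nil =>
    intro alive hsub _
    have : alive = [] := List.eq_nil_iff_forall_not_mem.mpr (fun a ha => List.not_mem_nil (hsub a ha))
    subst this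
    rw [pvLoopA.eq_def, pvMin2_unfold]
    rfl
  | cons p rest ih =>
    intro alive hsub hpw
    rw [List.pairwise_cons] at hpw
    by_cases hc : PySem.Set.contains alive p = true
    · have hp : p ∈ alive := by simpa [PySem.Set.contains] using hc
      have hall : ∀ q ∈ alive, q = p ∨ pvLexLT p q := by
        intro q hq
        rcases List.mem_cons.mp (hsub q hq) with h | h
        · exact Or.inl h
        · exact Or.inr (hpw.1 q h)
      have hmin : PySem.List.min2? alive (fun p => p.2) (fun p => p.1) = some p :=
        pvMin2_eq alive p hp hall
      rw [pvLoopA.eq_def]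
      split
      · rename_i heq; rw [hmin] at heq; exact absurd heq (by simp)
      · rename_i st heq
        rw [hmin] at heq
        have hst : st = p := (Option.some.inj heq).symm
        subst hst
        simp only [pvLoopB, hc, if_true]
        have hw : pvGrowWB alive st.1 st.2 1 alive.length = pvGrowW alive st.1 st.2 1 alive.length :=
          pvGrowW_eq alive st.1 st.2 alive.length 1
        rw [hw, pvGrowH_eq]
        congr 1
        rw [pvDiscard_eq_diff, ← pvRmA_eq]
        set w := pvGrowW alive st.1 st.2 1 alive.length with hwdef
        set h := pvGrowHA alive st.1 st.2 w 1 alive.length with hhdef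
        apply ih
        · intro q hq
          rw [PySem.Set.diff, List.mem_filter] at hq
          have hqa : q ∈ alive := hq.1
          have hqrm : q ∉ pvRmA st.1 st.2 w h := by
            intro hmem
            have : PySem.Set.contains (pvRmA st.1 st.2 w h) q = true := by
              simpa [PySem.Set.contains] using hmem
            rw [this] at hq
            simp at hq
          have hqp : q ≠ st := by
            intro hqp
            apply hqrm
            rw [hqp]
            have := pvMem_rmA st.1 st.2 w h (pvGrowW_ge alive st.1 st.2 alive.length 1)
              (pvGrowHA_ge alive st.1 st.2 w alive.length 1)
            simpa using this
          rcases List.mem_cons.mp (hsub q hqa) with h' | h'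
          · exact absurd h' hqp
          · exact h'
        · exact hpw.2
    · rw [pvLoopB]
      rw [if_neg hc]
      apply ih _ ?_ hpw.2
      intro q hq
      rcases List.mem_cons.mp (hsub q hq) with h | h
      · subst h
        exact absurd (by simpa [PySem.Set.contains] using hq) hc
      · exact h

-- ===== VERDICT (by name: the statement is the Claim_ definition above) =====
theorem decompose_shape_to_rectangles_spec : Claim_equal_decompose_shape_to_rectangles := by
  intro points _
  unfold Spec_decompose_shape_to_rectangles
  unfold decompose_shape_to_rectangles decompose_shape_to_rectangles_alt
  by_cases hnil : points = []
  · subst hnil; rfl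
  · rw [if_neg hnil]
    have hnd : (PySem.List.sorted2 (PySem.Set.ofList points) (fun p => p.2) (fun p => p.1)).Nodup :=
      ((PySem.List.sorted2_perm (PySem.Set.ofList points) _ _ false).symm).nodup
        (PySem.Set.nodup_ofList points)
    have hpwlt : (PySem.List.sorted2 (PySem.Set.ofList points) (fun p => p.2) (fun p => p.1)).Pairwise pvLexLT := by
      have hle := pvSorted2_pairwise (PySem.Set.ofList points)
      have := hle.and hnd
      exact this.imp (fun hab => pvLexLT_of_le_ne hab.1 hab.2)
    refine (pvLoop_eq _ _ ?_ hpwlt).symm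
    intro q hq
    exact ((PySem.List.sorted2_perm (PySem.Set.ofList points) _ _ false).mem_iff).mpr hq
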